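-- pv_equiv track=rewrite | github.com/yashwantharcot/Retrival-Augmented-Generation-AI-Agent-Backend | pdf_synopsis/pdf_robust_extractor.py | extract_price_sections
-- ===== SOURCE A (Python) =====
-- def extract_price_sections(text: str) -> str:
--     keywords = ["price", "schedule of rates", "BOQ", "financial bid", "unit price", "amount", "rate", "cost"]
--     lines = text.splitlines()
--     relevant = []
--     for i, line in enumerate(lines):
--         if any(kw.lower() in line.lower() for kw in keywords):
--             # Grab a window of lines around the keyword
--             start = max(0, i-5)
--             end = min(len(lines), i+15)
--             relevant.extend(lines[start:end])
--     # Remove duplicates and join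
--     return '\n'.join(list(dict.fromkeys(relevant)))
-- ===== SOURCE B (Python) =====
-- def extract_price_sections(text: str) -> str:
--     keywords = ["price", "schedule of rates", "BOQ", "financial bid", "unit price", "amount", "rate", "cost"]
--     lows = [kw.lower() for kw in keywords]
--     lines = text.splitlines()
--     n = len(lines)
--     covered = [False] * n
--     for i, line in enumerate(lines):
--         low = line.lower()
--         if any(kw in low for kw in lows):
--             for j in range(max(0, i - 5), min(n, i + 15)):
--                 covered[j] = True
--     out = []
--     for j in range(n):
--         if covered[j]:
--             out.append(lines[j])
--     return '\n'.join(dict.fromkeys(out))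
-- ===== Notes on version B (the rewrite author's own statement) =====
-- stated objective: alternative
-- what changed: Replaces the per-keyword-line overlapping window extends (which duplicate lines across windows and rely on the final dedup to remove them) with a boolean coverage mask over line indices filled once, followed by a single ordered sweep collecting the covered lines; the content-level dedup before joining is kept.
import Mathlib
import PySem

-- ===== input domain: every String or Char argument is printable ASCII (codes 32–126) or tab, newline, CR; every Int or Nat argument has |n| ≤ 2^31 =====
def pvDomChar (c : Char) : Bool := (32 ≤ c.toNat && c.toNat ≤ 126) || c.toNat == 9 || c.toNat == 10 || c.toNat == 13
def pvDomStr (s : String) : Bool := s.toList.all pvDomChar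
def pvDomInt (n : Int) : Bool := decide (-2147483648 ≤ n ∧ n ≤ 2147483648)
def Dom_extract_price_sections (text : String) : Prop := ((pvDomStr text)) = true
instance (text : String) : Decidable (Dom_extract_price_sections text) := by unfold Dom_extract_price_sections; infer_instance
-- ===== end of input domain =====

-- B replaces A's overlapping per-keyword window extends with a boolean coverage
-- mask over line indices plus one ordered sweep (alternative decomposition, same cost class).


-- ===== PORT A =====
def pvKeywords : List String :=
  ["price", "schedule of rates", "BOQ", "financial bid", "unit price", "amount", "rate", "cost"]

def extract_price_sections (text : String) : String :=
  let lines := PySem.Str.splitlines text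
  let relevant := (PySem.List.enumerate lines 0).foldl
    (fun acc p =>
      if pvKeywords.any (fun kw => PySem.Str.isIn (PySem.Str.lower kw) (PySem.Str.lower p.2)) then
        acc ++ PySem.List.slice lines (some (max 0 (p.1 - 5))) (some (min (lines.length : Int) (p.1 + 15)))
      else acc) []
  PySem.Str.join "\n" (PySem.List.dedup relevant)

-- ===== PORT B =====
-- port of Source B: fill a boolean coverage array, then one sweep collecting covered lines.
-- (covered[j] = True: j comes from range(max(0,i-5), …) so j ≥ 0 and .toNat is exact)
def extract_price_sections_alt (text : String) : String :=
  let lows := pvKeywords.map PySem.Str.lower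
  let lines := PySem.Str.splitlines text
  let n : Int := (lines.length : Int)
  let covered := (PySem.List.enumerate lines 0).foldl
    (fun cov p =>
      if lows.any (fun kw => PySem.Str.isIn kw (PySem.Str.lower p.2)) then
        (PySem.List.pyRange (max 0 (p.1 - 5)) (min n (p.1 + 15)) 1).foldl
          (fun c j => c.set j.toNat true) cov
      else cov) (List.replicate lines.length false)
  let out := (PySem.List.pyRange 0 n 1).foldl
    (fun acc j =>
      if PySem.List.pyGetD covered j false then acc ++ [PySem.List.pyGetD lines j ""] else acc) []
  PySem.Str.join "\n" (PySem.List.dedup out)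

-- ===== PRECONDITION & SPEC =====
def Spec_extract_price_sections (text : String) (out : String) : Prop := out = extract_price_sections_alt text
instance (text : String) (out : String) : Decidable (Spec_extract_price_sections text out) := by unfold Spec_extract_price_sections; infer_instance

-- ===== CLAIM (what is proved, stated in full; the proofs are below) =====
def Claim_equal_extract_price_sections : Prop := ∀ (text : String), Dom_extract_price_sections text → Spec_extract_price_sections text (extract_price_sections text)

-- ===== LEMMAS AND PROOFS =====

-- the keyword test on line k, the matched indices, and the window [k-5, min n (k+15)) of A
def pvQ (ls : List String) (k : Nat) : Bool :=
  pvKeywords.any (fun kw => PySem.Str.isIn (PySem.Str.lower kw) (PySem.Str.lower (ls.getD k "")))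
def pvM (ls : List String) : List Nat := (List.range ls.length).filter (pvQ ls)
def pvLo (k : Nat) : Nat := k - 5
def pvHi (n k : Nat) : Nat := min n (k + 15)
def pvWin (n k : Nat) : List Nat := List.range' (pvLo k) (pvHi n k - pvLo k)
-- first-occurrence union of the windows, and the per-index coverage test of B
def pvR (ls : List String) : List Nat :=
  (pvM ls).foldl (fun S k => PySem.Set.update S (pvWin ls.length k)) []
def pvCovB (ls : List String) (j : Nat) : Bool :=
  (pvM ls).any (fun k => decide (pvLo k ≤ j) && decide (j < pvHi ls.length k))

lemma pv_map_getD_range' {α : Type} (xs : List α) (d : α) (a m : Nat) (h : a + m ≤ xs.length) :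
    (List.range' a m).map (fun j => xs.getD j d) = (xs.drop a).take m := by
  induction m generalizing a with
  | zero => simp
  | succ m ih =>
    have ha : a < xs.length := by omega
    rw [List.range'_succ, List.map_cons, ih (a+1) (by omega),
        List.drop_eq_getElem_cons ha, List.take_succ_cons]
    simp [List.getD_eq_getElem?_getD, List.getElem?_eq_getElem ha]

lemma pv_slice_eq_win (ls : List String) (k : Nat) (hk : k < ls.length) :
    PySem.List.slice ls (some (max 0 ((k:Int) - 5))) (some (min ((ls.length : Int)) ((k:Int) + 15)))
      = (pvWin ls.length k).map (fun j => ls.getD j "") := by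
  have h1 : max 0 ((k:Int) - 5) = ((pvLo k : Nat) : Int) := by unfold pvLo; omega
  have h2 : min ((ls.length : Int)) ((k:Int) + 15) = ((pvHi ls.length k : Nat) : Int) := by
    unfold pvHi; omega
  rw [h1, h2, PySem.List.slice_natCast, pvWin,
      pv_map_getD_range' ls "" (pvLo k) (pvHi ls.length k - pvLo k) (by unfold pvLo pvHi; omega)]

lemma pv_pyRange_natCast (n : Nat) :
    PySem.List.pyRange 0 ((n : Int)) = List.map (fun k : Nat => ((k : Nat) : Int)) (List.range n) := by
  rw [PySem.List.pyRange_one]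
  have h : ((n : Int) - 0).toNat = n := by omega
  rw [h]
  apply List.map_congr_left
  intro a _
  omega

lemma pv_enum_foldl {β : Type} (ls : List String) (f : β → Int × String → β) (init : β) :
    (PySem.List.enumerate ls 0).foldl f init
      = (List.range ls.length).foldl (fun acc (k : Nat) => f acc (((k : Nat) : Int), ls.getD k "")) init := by
  rw [PySem.List.enumerate_eq_map_pyRange ls "",
      show PySem.List.len ls = ((ls.length : Int)) from by simp,
      pv_pyRange_natCast, List.map_map, List.foldl_map]
  apply PySem.List.foldl_congr_mem
  intro acc k _
  simp only [Function.comp_apply, PySem.List.pyGetD_natCast]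

lemma pv_relA (ls : List String) :
    (PySem.List.enumerate ls 0).foldl
      (fun acc p =>
        if pvKeywords.any (fun kw => PySem.Str.isIn (PySem.Str.lower kw) (PySem.Str.lower p.2)) then
          acc ++ PySem.List.slice ls (some (max 0 (p.1 - 5))) (some (min ((ls.length : Int)) (p.1 + 15)))
        else acc) []
    = (pvM ls).flatMap (fun k => (pvWin ls.length k).map (fun j => ls.getD j "")) := by
  rw [pv_enum_foldl]
  rw [PySem.List.foldl_congr_mem (List.range ls.length) _
      (fun acc k => if pvQ ls k then acc ++ (pvWin ls.length k).map (fun j => ls.getD j "") else acc) []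
      (by
        intro acc k hkmem
        have hk : k < ls.length := List.mem_range.mp hkmem
        rw [pv_slice_eq_win ls k hk]
        rfl)]
  rw [PySem.List.foldl_if_eq_foldl_filter (pvQ ls)
      (fun acc k => acc ++ (pvWin ls.length k).map (fun j => ls.getD j "")),
      PySem.List.foldl_append_eq_flatMap, List.nil_append]
  rfl

lemma pv_dedup_flatMap {α : Type} [BEq α] [LawfulBEq α] (f : Nat → List α) (ms : List Nat) :
    PySem.List.dedup (ms.flatMap f) = ms.foldl (fun S k => PySem.Set.update S (f k)) [] := by
  induction ms using List.reverseRecOn with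
  | nil => rfl
  | append_singleton ms k ih =>
    rw [PySem.List.dedup_eq_ofList] at ih
    rw [List.flatMap_append, PySem.List.dedup_eq_ofList, PySem.Set.ofList_append,
        List.foldl_append, ih, show List.flatMap f [k] = f k from by simp]
    simp only [List.foldl_cons, List.foldl_nil]

lemma pv_update_of_subset {α : Type} [BEq α] [LawfulBEq α] (S w : List α) (h : ∀ x ∈ w, x ∈ S) :
    List.foldl PySem.Set.add S w = S := by
  have hu : PySem.Set.update S w = S := by
    rw [PySem.Set.update_eq_append_filter, List.filter_eq_nil_iff.mpr, List.append_nil]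
    intro a ha
    have haw : a ∈ w := (PySem.Set.mem_ofList w a).mp ha
    simp [h a haw]
  exact hu

lemma pv_foldl_add_prefix {α : Type} [BEq α] [LawfulBEq α] (l : List α) : ∀ (S : List α),
    ∃ u, l.foldl PySem.Set.add S = S ++ u := by
  induction l with
  | nil => intro S; exact ⟨[], by simp⟩
  | cons y l ihl =>
    intro S
    by_cases hy : y ∈ S
    · have hadd : PySem.Set.add S y = S := by
        simp [PySem.Set.add, hy]
      rw [List.foldl_cons, hadd]
      exact ihl S
    · have hadd : PySem.Set.add S y = S ++ [y] := by
        simp [PySem.Set.add, hy]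
      rw [List.foldl_cons, hadd]
      obtain ⟨u, hu⟩ := ihl (S ++ [y])
      exact ⟨y :: u, by rw [hu, List.append_assoc]; rfl⟩

lemma pv_dmd (g : Nat → String) (l : List Nat) : ∀ (S : List Nat) (T : List String),
    (∀ j ∈ S, g j ∈ T) →
    ((l.foldl PySem.Set.add S).map g).foldl PySem.Set.add T = (l.map g).foldl PySem.Set.add T := by
  induction l with
  | nil =>
    intro S T h
    simp only [List.foldl_nil, List.map_nil]
    exact pv_update_of_subset T (S.map g) (by
      intro x hx
      obtain ⟨j, hj, rfl⟩ := List.mem_map.mp hx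
      exact h j hj)
  | cons x l ih =>
    intro S T h
    by_cases hx : x ∈ S
    · have hadd : PySem.Set.add S x = S := by
        simp [PySem.Set.add, hx]
      have haddT : PySem.Set.add T (g x) = T := by
        simp [PySem.Set.add, h x hx]
      rw [List.foldl_cons, hadd, List.map_cons, List.foldl_cons, haddT]
      exact ih S T h
    · have hadd : PySem.Set.add S x = S ++ [x] := by
        simp [PySem.Set.add, hx]
      have hinv : ∀ j ∈ S ++ [x], g j ∈ PySem.Set.add T (g x) := by
        intro j hj
        rcases List.mem_append.mp hj with h1 | h2
        · exact (PySem.Set.mem_add T (g x) (g j)).mpr (Or.inl (h j h1))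
        · have hjx : j = x := by simpa using h2
          subst hjx
          exact (PySem.Set.mem_add T (g j) (g j)).mpr (Or.inr rfl)
      rw [List.foldl_cons, hadd, List.map_cons, List.foldl_cons]
      obtain ⟨u, hu⟩ := pv_foldl_add_prefix l (S ++ [x])
      have ihx := ih (S ++ [x]) (PySem.Set.add T (g x)) hinv
      rw [hu, List.map_append, List.foldl_append] at ihx ⊢
      have hTS : List.foldl PySem.Set.add T (List.map g (S ++ [x])) = PySem.Set.add T (g x) := by
        rw [List.map_append, List.foldl_append,
            pv_update_of_subset T (List.map g S) (by
              intro y hy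
              obtain ⟨j, hj, rfl⟩ := List.mem_map.mp hy
              exact h j hj)]
        rfl
      have hTS' : List.foldl PySem.Set.add (PySem.Set.add T (g x)) (List.map g (S ++ [x]))
          = PySem.Set.add T (g x) :=
        pv_update_of_subset _ _ (by
          intro y hy
          obtain ⟨j, hj, rfl⟩ := List.mem_map.mp hy
          exact hinv j hj)
      rw [hTS' ] at ihx
      rw [hTS]
      exact ihx

lemma pv_dedup_map_dedup (g : Nat → String) (l : List Nat) :
    PySem.List.dedup ((PySem.List.dedup l).map g) = PySem.List.dedup (l.map g) := by
  simp only [PySem.List.dedup_eq_ofList, PySem.Set.ofList_eq_foldl]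
  exact pv_dmd g l [] [] (by intro j hj; cases hj)

lemma pv_sweep (n : Nat) (ms : List Nat) : ∀ (S : List Nat) (e₀ : Nat),
    S.Pairwise (· < ·) →
    (∀ j ∈ S, j < e₀) →
    (∀ k ∈ ms, ∀ j, pvLo k ≤ j → j < e₀ → j ∈ S) →
    (∀ k ∈ ms, e₀ ≤ pvHi n k) →
    (∀ k ∈ ms, pvLo k ≤ pvHi n k) →
    ms.Pairwise (fun a b => pvLo a ≤ pvLo b ∧ pvHi n a ≤ pvHi n b) →
    (ms.foldl (fun S k => PySem.Set.update S (pvWin n k)) S).Pairwise (· < ·) ∧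
    (∀ j, j ∈ ms.foldl (fun S k => PySem.Set.update S (pvWin n k)) S ↔
      j ∈ S ∨ ∃ k ∈ ms, pvLo k ≤ j ∧ j < pvHi n k) := by
  induction ms with
  | nil =>
    intro S e₀ hS _ _ _ _ _
    exact ⟨hS, by simp⟩
  | cons k ms ih =>
    intro S e₀ hS hb hcov hhi hlohi hmono
    have hk_hi : e₀ ≤ pvHi n k := hhi k (by simp)
    have hk_lohi : pvLo k ≤ pvHi n k := hlohi k (by simp)
    have hwin_nodup : (pvWin n k).Nodup := List.nodup_range' 1 (by norm_num)
    set m := max (pvLo k) e₀ with hm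
    have hm_le : m ≤ pvHi n k := by omega
    have key : PySem.Set.update S (pvWin n k) = S ++ List.range' m (pvHi n k - m) := by
      rw [PySem.Set.update_eq_append_filter, PySem.Set.ofList_eq_self_of_nodup _ hwin_nodup]
      congr 1
      have hsplit : pvWin n k = List.range' (pvLo k) (m - pvLo k) ++ List.range' m (pvHi n k - m) := by
        have hap := @List.range'_append (pvLo k) (m - pvLo k) (pvHi n k - m) 1
        have e1 : pvLo k + 1 * (m - pvLo k) = m := by omega
        have e2 : (m - pvLo k) + (pvHi n k - m) = pvHi n k - pvLo k := by omega
        rw [e1, e2] at hap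
        unfold pvWin
        exact hap.symm
      rw [hsplit, List.filter_append]
      have hfirst : (List.range' (pvLo k) (m - pvLo k)).filter (fun y => !PySem.Set.contains S y) = [] := by
        rw [List.filter_eq_nil_iff]
        intro j hj
        rw [List.mem_range'_1] at hj
        have hjS : j ∈ S := hcov k (by simp) j (by omega) (by omega)
        simp [hjS]
      have hsecond : (List.range' m (pvHi n k - m)).filter (fun y => !PySem.Set.contains S y)
          = List.range' m (pvHi n k - m) := by
        rw [List.filter_eq_self]
        intro j hj
        rw [List.mem_range'_1] at hj
        have hjn : j ∉ S := fun hjS => by have := hb j hjS; omega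
        simp [hjn]
      rw [hfirst, hsecond, List.nil_append]
    simp only [List.foldl_cons]
    rw [key]
    set S' := S ++ List.range' m (pvHi n k - m) with hS'
    have hS'pair : S'.Pairwise (· < ·) := by
      rw [hS', List.pairwise_append]
      refine ⟨hS, List.pairwise_lt_range' 1 (by norm_num), ?_⟩
      intro a ha b hb'
      rw [List.mem_range'_1] at hb'
      have := hb a ha; omega
    have hS'bound : ∀ j ∈ S', j < pvHi n k := by
      intro j hj
      rcases List.mem_append.mp hj with h | h
      · have := hb j h; omega
      · rw [List.mem_range'_1] at h; omega
    have hmem' : ∀ j, j ∈ S' ↔ j ∈ S ∨ (pvLo k ≤ j ∧ j < pvHi n k) := by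
      intro j
      rw [hS', List.mem_append, List.mem_range'_1]
      constructor
      · rintro (h | h)
        · exact Or.inl h
        · exact Or.inr ⟨by omega, by omega⟩
      · rintro (h | ⟨h1, h2⟩)
        · exact Or.inl h
        · by_cases hj : j < m
          · exact Or.inl (hcov k (by simp) j h1 (by omega))
          · exact Or.inr ⟨by omega, by omega⟩
    obtain ⟨hhead, htail⟩ := List.pairwise_cons.mp hmono
    have ih' := ih S' (pvHi n k) hS'pair hS'bound
      (by
        intro k' hk' j hj1 hj2
        rcases hhead k' hk' with ⟨hlo, hhi2⟩
        by_cases hje : j < e₀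
        · exact (hmem' j).mpr (Or.inl (hcov k' (by simp [hk']) j hj1 hje))
        · exact (hmem' j).mpr (Or.inr ⟨by omega, hj2⟩))
      (fun k' h => (hhead k' h).2)
      (fun k' h => hlohi k' (by simp [h]))
      htail
    refine ⟨ih'.1, ?_⟩
    intro j
    rw [ih'.2 j, hmem' j]
    constructor
    · rintro ((h | h) | ⟨k', hk', hh⟩)
      · exact Or.inl h
      · exact Or.inr ⟨k, by simp, h⟩
      · exact Or.inr ⟨k', by simp [hk'], hh⟩
    · rintro (h | ⟨k', hk', hh⟩)
      · exact Or.inl (Or.inl h)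
      · rcases List.mem_cons.mp hk' with rfl | hk''
        · exact Or.inl (Or.inr hh)
        · exact Or.inr ⟨k', hk'', hh⟩

lemma pv_M_pairwise (ls : List String) : (pvM ls).Pairwise (· < ·) :=
  List.Pairwise.filter _ List.pairwise_lt_range

lemma pv_M_lt (ls : List String) (k : Nat) (hk : k ∈ pvM ls) : k < ls.length := by
  have := List.mem_filter.mp hk
  exact List.mem_range.mp this.1

lemma pv_R_spec (ls : List String) :
    (pvR ls).Pairwise (· < ·) ∧
    (∀ j, j ∈ pvR ls ↔ ∃ k ∈ pvM ls, pvLo k ≤ j ∧ j < pvHi ls.length k) := by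
  have h := pv_sweep ls.length (pvM ls) [] 0
    (by simp) (by simp) (by simp) (by simp)
    (by
      intro k hk
      have := pv_M_lt ls k hk
      unfold pvLo pvHi; omega)
    ((pv_M_pairwise ls).imp (fun hab => ⟨by unfold pvLo; omega, by unfold pvHi; omega⟩))
  exact ⟨h.1, fun j => by simpa using h.2 j⟩

lemma pv_R_eq_filter (ls : List String) :
    pvR ls = (List.range ls.length).filter (pvCovB ls) := by
  obtain ⟨hp, hm⟩ := pv_R_spec ls
  have hmem : ∀ j, j ∈ pvR ls ↔ j ∈ (List.range ls.length).filter (pvCovB ls) := by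
    intro j
    rw [hm j, List.mem_filter, List.mem_range]
    unfold pvCovB
    rw [List.any_eq_true]
    constructor
    · rintro ⟨k, hk, h1, h2⟩
      have hkn := pv_M_lt ls k hk
      exact ⟨by unfold pvHi at h2; omega, ⟨k, hk, by simp [h1, h2]⟩⟩
    · rintro ⟨hj, k, hk, hb⟩
      simp only [Bool.and_eq_true, decide_eq_true_eq] at hb
      exact ⟨k, hk, hb.1, hb.2⟩
  have hnd1 : (pvR ls).Nodup := hp.imp (fun h => Nat.ne_of_lt h)
  have hnd2 : ((List.range ls.length).filter (pvCovB ls)).Nodup :=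
    (List.nodup_range).filter _
  have hperm : (pvR ls).Perm ((List.range ls.length).filter (pvCovB ls)) :=
    (List.perm_ext_iff_of_nodup hnd1 hnd2).mpr hmem
  exact List.eq_of_perm_of_sorted (fun a b _ _ h1 h2 => by omega)
    hp (List.Pairwise.filter _ List.pairwise_lt_range) hperm

-- B-side: the coverage array
lemma pv_set_foldl_length (w : List Nat) : ∀ (c : List Bool),
    (w.foldl (fun c j => c.set j true) c).length = c.length := by
  induction w with
  | nil => simp
  | cons i w ih =>
    intro c
    simp only [List.foldl_cons]
    rw [ih]
    exact List.length_set

lemma pv_set_foldl_getD (w : List Nat) : ∀ (c : List Bool) (j : Nat),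
    (w.foldl (fun c j => c.set j true) c).getD j false
      = (c.getD j false || (decide (j ∈ w) && decide (j < c.length))) := by
  induction w with
  | nil => simp
  | cons i w ih =>
    intro c j
    simp only [List.foldl_cons]
    rw [ih, List.length_set]
    have hset : (c.set i true).getD j false
        = ((decide (i = j) && decide (j < c.length)) || c.getD j false) := by
      rw [List.getD_eq_getElem?_getD, List.getElem?_set, List.getD_eq_getElem?_getD]
      by_cases h1 : i = j
      · subst h1
        by_cases h2 : i < c.length
        · simp [h2]
        · simp [h2]
      · simp [h1]
    rw [hset]
    by_cases h1 : i = j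
    · subst h1
      by_cases h3 : i < c.length <;> by_cases h2 : i ∈ w <;> simp [h2, h3]
    · have h1' : ¬ (j = i) := fun h => h1 h.symm
      simp [h1, h1', List.mem_cons]

lemma pv_cov_getD (ls : List String) (ms : List Nat) : ∀ (c : List Bool), c.length = ls.length →
    ∀ j, (ms.foldl (fun c k => (pvWin ls.length k).foldl (fun c j => c.set j true) c) c).getD j false
      = (c.getD j false || ms.any (fun k => decide (pvLo k ≤ j) && decide (j < pvHi ls.length k))) := by
  induction ms with
  | nil => intro c hc j; simp
  | cons k ms ih =>
    intro c hc j
    simp only [List.foldl_cons]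
    rw [ih _ (by rw [pv_set_foldl_length]; exact hc), pv_set_foldl_getD]
    have hwm : (decide (j ∈ pvWin ls.length k) && decide (j < c.length))
        = (decide (pvLo k ≤ j) && decide (j < pvHi ls.length k)) := by
      rw [Bool.eq_iff_iff]
      simp only [Bool.and_eq_true, decide_eq_true_eq, pvWin, List.mem_range'_1, hc]
      unfold pvLo pvHi
      omega
    rw [hwm, List.any_cons]
    simp [Bool.or_assoc]

-- B-side: the covered-fill loop, in pvM-normal form
lemma pv_covB_eq (ls : List String) :
    (PySem.List.enumerate ls 0).foldl
      (fun cov p =>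
        if (pvKeywords.map PySem.Str.lower).any (fun kw => PySem.Str.isIn kw (PySem.Str.lower p.2)) then
          (PySem.List.pyRange (max 0 (p.1 - 5)) (min ((ls.length : Int)) (p.1 + 15)) 1).foldl
            (fun c j => c.set j.toNat true) cov
        else cov) (List.replicate ls.length false)
    = (pvM ls).foldl (fun c k => (pvWin ls.length k).foldl (fun c j => c.set j true) c)
        (List.replicate ls.length false) := by
  rw [pv_enum_foldl]
  rw [PySem.List.foldl_congr_mem (List.range ls.length) _
      (fun c k => if pvQ ls k then (pvWin ls.length k).foldl (fun c j => c.set j true) c else c)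
      (List.replicate ls.length false)
      (by
        intro c k hkmem
        have hpred : (pvKeywords.map PySem.Str.lower).any
            (fun kw => PySem.Str.isIn kw (PySem.Str.lower (ls.getD k ""))) = pvQ ls k := by
          rw [List.any_map]; rfl
        have h1 : max 0 ((k:Int) - 5) = ((pvLo k : Nat) : Int) := by unfold pvLo; omega
        have h2 : min ((ls.length : Int)) ((k:Int) + 15) = ((pvHi ls.length k : Nat) : Int) := by
          unfold pvHi; omega
        have hwin : pvWin ls.length k
            = (List.range (pvHi ls.length k - pvLo k)).map (fun t => pvLo k + t) := by
          unfold pvWin; exact List.range'_eq_map_range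
        have hrange : (PySem.List.pyRange (max 0 ((k:Int) - 5)) (min ((ls.length : Int)) ((k:Int) + 15)) 1).foldl
            (fun c (j : Int) => c.set j.toNat true) c
            = (pvWin ls.length k).foldl (fun c j => c.set j true) c := by
          rw [h1, h2, PySem.List.pyRange_one]
          have h3 : (((pvHi ls.length k : Nat) : Int) - ((pvLo k : Nat) : Int)).toNat
              = pvHi ls.length k - pvLo k := by omega
          rw [h3, List.foldl_map, hwin, List.foldl_map]
          apply PySem.List.foldl_congr_mem
          intro acc t _
          have ht : (((pvLo k : Nat) : Int) + ((t : Nat) : Int)).toNat = pvLo k + t := by omega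
          rw [ht]
        rw [hpred, hrange])]
  rw [PySem.List.foldl_if_eq_foldl_filter (pvQ ls)
      (fun (c : List Bool) k => (pvWin ls.length k).foldl (fun c j => c.set j true) c)]
  rfl

lemma pv_Cm_getD (ls : List String) (j : Nat) :
    ((pvM ls).foldl (fun c k => (pvWin ls.length k).foldl (fun c j => c.set j true) c)
      (List.replicate ls.length false)).getD j false = pvCovB ls j := by
  rw [pv_cov_getD ls (pvM ls) _ (by simp) j]
  have hrep : (List.replicate ls.length false).getD j false = false := by
    rw [List.getD_eq_getElem?_getD, List.getElem?_replicate]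
    split <;> rfl
  rw [hrep, Bool.false_or]
  rfl

-- B-side: the output sweep
lemma pv_relB (ls : List String) (C : List Bool) (hCg : ∀ j, C.getD j false = pvCovB ls j) :
    (PySem.List.pyRange 0 ((ls.length : Int)) 1).foldl
      (fun acc j => if PySem.List.pyGetD C j false then acc ++ [PySem.List.pyGetD ls j ""] else acc) []
    = (pvR ls).map (fun j => ls.getD j "") := by
  rw [pv_pyRange_natCast, List.foldl_map]
  rw [PySem.List.foldl_congr_mem (List.range ls.length) _
      (fun acc k => if C.getD k false then acc ++ [ls.getD k ""] else acc) []
      (by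
        intro acc k _
        rw [PySem.List.pyGetD_natCast, PySem.List.pyGetD_natCast])]
  rw [PySem.List.foldl_append_if (fun k => C.getD k false) (fun k => ls.getD k ""), List.nil_append]
  rw [List.filter_congr (fun j _ => hCg j), ← pv_R_eq_filter]

-- the deduplicated relevant lists of A and B agree
lemma pv_core (ls : List String) :
    PySem.List.dedup ((pvM ls).flatMap (fun k => (pvWin ls.length k).map (fun j => ls.getD j "")))
      = PySem.List.dedup ((pvR ls).map (fun j => ls.getD j "")) := by
  rw [show ((pvM ls).flatMap fun k => (pvWin ls.length k).map fun j => ls.getD j "")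
        = ((pvM ls).flatMap (pvWin ls.length)).map (fun j => ls.getD j "") from
      (List.map_flatMap).symm]
  rw [← pv_dedup_map_dedup (fun j => ls.getD j "") ((pvM ls).flatMap (pvWin ls.length))]
  rw [pv_dedup_flatMap (pvWin ls.length) (pvM ls)]
  rfl

-- ===== VERDICT (by name: the statement is the Claim_ definition above) =====
theorem extract_price_sections_spec : Claim_equal_extract_price_sections := by
  unfold Claim_equal_extract_price_sections
  intro text _
  unfold Spec_extract_price_sections
  show extract_price_sections text = extract_price_sections_alt text
  simp only [extract_price_sections, extract_price_sections_alt]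
  set ls := PySem.Str.splitlines text with hls
  rw [pv_relA ls, pv_covB_eq ls, pv_relB ls _ (fun j => pv_Cm_getD ls j), pv_core ls]
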